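-- pv_equiv track=rewrite | github.com/davisr137/HackerRank | misc/knapsack.py | search
-- ===== SOURCE A (Python) =====
-- def search(packed, max_pack, a, k):
--
--     # iterate while it is possible to add to the knapsack
--     while len(packed) > 0:
--         new_pack = list()
--         # add element from a to packing to form new packing
--         for pack in packed:
--             for elt in a:
--                 val = pack + elt
--                 if val <= k:
--                     new_pack.append(val)
--         # update best solution
--         if len(new_pack) == 0:
--             max_pack = max(max_pack,max(packed))
--         else:
--             max_pack = max(max_pack,max(new_pack))
--         # set current packing to new packing
--         packed = new_pack
--
--     return(max_pack)
-- ===== SOURCE B (Python) =====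
-- # Depth-first worklist search over distinct reachable sums with a global visited
-- # set (each sum processed once), instead of A's level-synchronized expansion of a
-- # duplicate-keeping frontier with per-level maxima.
-- def search(packed, max_pack, a, k):
--     if not packed:
--         return max_pack
--     seen = set()
--     stack = []
--     for p in packed:
--         for e in a:
--             w = p + e
--             if w <= k and w not in seen:
--                 seen.add(w)
--                 stack.append(w)
--     if not stack:
--         return max(max_pack, max(packed))
--     while stack:
--         v = stack.pop()
--         for e in a:
--             w = v + e
--             if w <= k and w not in seen:
--                 seen.add(w)
--                 stack.append(w)
--     return max(max_pack, max(seen))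
-- ===== Notes on version B (the rewrite author's own statement) =====
-- stated objective: faster
-- what changed: A does level-synchronized frontier expansion, keeping every duplicate sum in each level list and updating a per-level running maximum; B does a depth-first worklist search with a global visited set, so each distinct reachable sum is expanded exactly once, and takes the maximum of the visited set at the end.
import Mathlib
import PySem

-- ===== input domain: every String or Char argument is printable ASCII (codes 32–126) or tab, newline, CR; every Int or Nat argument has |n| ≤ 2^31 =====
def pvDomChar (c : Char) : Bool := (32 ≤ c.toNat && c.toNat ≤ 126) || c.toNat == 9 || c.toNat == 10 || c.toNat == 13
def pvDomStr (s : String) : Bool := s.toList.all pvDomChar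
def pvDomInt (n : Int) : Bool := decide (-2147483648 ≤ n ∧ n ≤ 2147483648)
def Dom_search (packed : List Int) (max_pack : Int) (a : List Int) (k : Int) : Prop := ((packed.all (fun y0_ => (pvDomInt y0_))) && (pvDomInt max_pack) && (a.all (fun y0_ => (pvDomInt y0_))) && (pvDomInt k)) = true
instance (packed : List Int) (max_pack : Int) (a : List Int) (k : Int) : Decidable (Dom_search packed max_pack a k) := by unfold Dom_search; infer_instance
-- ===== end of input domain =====

-- B replaces A's level-synchronized expansion of duplicate-keeping frontier lists
-- by a depth-first worklist search with a global visited set (each distinct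
-- reachable sum expanded once); equivalence is proved on the inputs where A
-- terminates (Pre_search below).

-- max(l) for a nonempty Python list/set of ints (shared primitive of both ports)
def pyMaxL (l : List Int) : Int := (PySem.List.max? l (fun x => x)).getD 0

-- ===== PORT A =====
-- one iteration of A's while-loop body building new_pack (two nested for-loops);
-- new_pack.append(val) is encoded with a reversed-cons accumulator and one final
-- reverse so that evaluation stays linear (it builds exactly Python's list)
def searchStep (a : List Int) (k : Int) (packed : List Int) : List Int :=
  (packed.foldl (fun new_pack pack =>
    a.foldl (fun np elt =>
      let val := pack + elt
      if val ≤ k then val :: np else np) new_pack) []).reverse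

-- A's while-loop; the fuel argument is only a totality guard (Pre_search proves it sufficient)
def searchLoop (a : List Int) (k : Int) : Nat → List Int → Int → Int
  | 0, _, max_pack => max_pack
  | fuel+1, packed, max_pack =>
    if packed = [] then max_pack
    else
      let np := searchStep a k packed
      let mp' := if np = [] then max max_pack (pyMaxL packed)
                 else max max_pack (pyMaxL np)
      searchLoop a k fuel np mp'

-- fuel bound: the levels die after at most k - min(packed) rounds (proved below)
def levelFuel (packed : List Int) (k : Int) : Nat :=
  (k - (PySem.List.min? packed (fun x => x)).getD 0).toNat

def search (packed : List Int) (max_pack : Int) (a : List Int) (k : Int) : Int :=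
  searchLoop a k (levelFuel packed k + 1) packed max_pack

-- ===== PORT B =====
-- B's inner 'for e in a: w = v+e; if w <= k and w not in seen: seen.add(w); stack.append(w)';
-- the stack's Python END (append/pop) is the Lean list's HEAD (cons/head) — a faithful
-- encoding of the same LIFO discipline
def altVisit (a : List Int) (k : Int) (sv : PySem.Set Int × List Int) (v : Int) :
    PySem.Set Int × List Int :=
  a.foldl (fun sv e =>
    let w := v + e
    if w ≤ k ∧ w ∉ sv.1 then (PySem.Set.add sv.1 w, w :: sv.2) else sv) sv

-- B's 'while stack: v = stack.pop(); <visit v>'; fuel is only a totality guard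
-- (shown sufficient under Pre_search), the loop returns the final visited set
def altLoop (a : List Int) (k : Int) : Nat → PySem.Set Int → List Int → PySem.Set Int
  | 0, seen, _ => seen
  | _+1, seen, [] => seen
  | fuel+1, seen, v :: rest =>
    let sv := altVisit a k (seen, rest) v
    altLoop a k fuel sv.1 sv.2

def search_alt (packed : List Int) (max_pack : Int) (a : List Int) (k : Int) : Int :=
  if packed = [] then max_pack
  else
    -- the initial double loop seeding seen/stack from packed
    let sv := packed.foldl (altVisit a k) (([] : PySem.Set Int), ([] : List Int))
    if sv.2 = [] then max max_pack (pyMaxL packed)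
    else max max_pack (pyMaxL (altLoop a k (levelFuel packed k + 1) sv.1 sv.2))

-- ===== PRECONDITION & SPEC =====
-- Pre_search is exactly where the Python A terminates: A loops forever as soon as
-- a contains a non-positive element and some pack+elt ≤ k keeps a level alive.
def Pre_search (packed : List Int) (max_pack : Int) (a : List Int) (k : Int) : Prop :=
  packed = [] ∨ a = [] ∨ (∀ x ∈ a, 0 < x) ∨ (∀ p ∈ packed, ∀ x ∈ a, k < p + x)

instance (packed : List Int) (max_pack : Int) (a : List Int) (k : Int) : Decidable (Pre_search packed max_pack a k) := by unfold Pre_search; infer_instance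

def pvWitness_search : List Int × Int × List Int × Int := ([1, 2], 0, [3], 10)

def Spec_search (packed : List Int) (max_pack : Int) (a : List Int) (k : Int) (out : Int) : Prop := out = search_alt packed max_pack a k
instance (packed : List Int) (max_pack : Int) (a : List Int) (k : Int) (out : Int) : Decidable (Spec_search packed max_pack a k out) := by unfold Spec_search; infer_instance

-- ===== CLAIM (what is proved, stated in full; the proofs are below) =====
def Claim_equal_search : Prop := ∀ (packed : List Int) (max_pack : Int) (a : List Int) (k : Int), Dom_search packed max_pack a k → Pre_search packed max_pack a k → Spec_search packed max_pack a k (search packed max_pack a k)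

-- ===== LEMMAS AND PROOFS =====

-- the sums reachable from packed by one or more additions of elements of a,
-- staying ≤ k at every step (the common semantics of both programs)
inductive Reach (a : List Int) (k : Int) (packed : List Int) : Int → Prop
  | base (p e : Int) : p ∈ packed → e ∈ a → p + e ≤ k → Reach a k packed (p + e)
  | step (v e : Int) : Reach a k packed v → e ∈ a → v + e ≤ k → Reach a k packed (v + e)

-- ---- generic pyMaxL facts ----

theorem pyMaxL_spec (l : List Int) (hl : l ≠ []) :
    pyMaxL l ∈ l ∧ ∀ x ∈ l, x ≤ pyMaxL l := by
  unfold pyMaxL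
  cases h : PySem.List.max? l (fun x => x) with
  | none => exact absurd ((PySem.List.max?_eq_none_iff l (fun x => x)).mp h) hl
  | some m =>
    exact ⟨PySem.List.max?_mem h, fun x hx => PySem.List.max?_isMax h x hx⟩

theorem pyMaxL_congr (l m : List Int) (hl : l ≠ []) (h : ∀ x, x ∈ l ↔ x ∈ m) :
    pyMaxL l = pyMaxL m := by
  have hm : m ≠ [] := by
    obtain ⟨x, hx⟩ := List.exists_mem_of_ne_nil l hl
    intro hm; rw [hm] at h; exact List.not_mem_nil ((h x).mp hx)
  obtain ⟨hmem1, hmax1⟩ := pyMaxL_spec l hl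
  obtain ⟨hmem2, hmax2⟩ := pyMaxL_spec m hm
  exact le_antisymm (hmax2 _ ((h _).mp hmem1)) (hmax1 _ ((h _).mpr hmem2))

theorem pyMaxL_append (xs ys : List Int) (hx : xs ≠ []) (hy : ys ≠ []) :
    pyMaxL (xs ++ ys) = max (pyMaxL xs) (pyMaxL ys) := by
  have hxy : xs ++ ys ≠ [] := by simp [hx]
  obtain ⟨hmem, hmax⟩ := pyMaxL_spec (xs ++ ys) hxy
  obtain ⟨hmemx, hmaxx⟩ := pyMaxL_spec xs hx
  obtain ⟨hmemy, hmaxy⟩ := pyMaxL_spec ys hy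
  apply le_antisymm
  · rcases List.mem_append.mp hmem with h | h
    · exact le_max_of_le_left (hmaxx _ h)
    · exact le_max_of_le_right (hmaxy _ h)
  · exact max_le (hmax _ (List.mem_append_left _ hmemx))
      (hmax _ (List.mem_append_right _ hmemy))

-- ---- A-side characterization ----

-- a 'for' loop doing 'if p(x): out.append(f(x))' on a reversed-cons accumulator
theorem foldl_cons_ite {α β : Type} (p : α → Prop) [DecidablePred p] (f : α → β) :
    ∀ (l : List α) (acc : List β),
      l.foldl (fun acc x => if p x then f x :: acc else acc) acc
        = ((l.filter (fun x => decide (p x))).map f).reverse ++ acc := by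
  intro l
  induction l with
  | nil => intro acc; simp
  | cons h t ih =>
    intro acc
    by_cases hp : p h <;> simp [List.foldl_cons, hp, ih]

theorem foldl_revApp_eq_flatMap {α β : Type} (G : α → List β) :
    ∀ (l : List α) (acc : List β),
      l.foldl (fun acc x => (G x).reverse ++ acc) acc = (l.flatMap G).reverse ++ acc := by
  intro l
  induction l with
  | nil => intro acc; simp
  | cons h t ih => intro acc; simp [List.foldl_cons, ih]

theorem searchStep_eq (a : List Int) (k : Int) (l : List Int) :
    searchStep a k l = l.flatMap (fun p =>
      (a.filter (fun e => decide (p + e ≤ k))).map (fun e => p + e)) := by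
  unfold searchStep
  have h1 : (fun (new_pack : List Int) (pack : Int) =>
      a.foldl (fun np elt => let val := pack + elt; if val ≤ k then val :: np else np) new_pack)
      = fun (acc : List Int) (p : Int) =>
        ((a.filter (fun e => decide (p + e ≤ k))).map (fun e => p + e)).reverse ++ acc := by
    funext acc p
    exact foldl_cons_ite (fun e => p + e ≤ k) (fun e => p + e) a acc
  rw [h1, foldl_revApp_eq_flatMap]
  simp

theorem mem_searchStep (a : List Int) (k : Int) (l : List Int) (x : Int) :
    x ∈ searchStep a k l ↔ ∃ p ∈ l, ∃ e ∈ a, p + e = x ∧ x ≤ k := by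
  rw [searchStep_eq]
  simp only [List.mem_flatMap, List.mem_map, List.mem_filter, decide_eq_true_eq]
  constructor
  · rintro ⟨p, hp, e, ⟨he, hle⟩, hx⟩
    exact ⟨p, hp, e, he, hx, by omega⟩
  · rintro ⟨p, hp, e, he, hx, hk⟩
    exact ⟨p, hp, e, ⟨he, by omega⟩, hx⟩

theorem searchStep_nil (a : List Int) (k : Int) : searchStep a k [] = [] := by
  simp [searchStep_eq]

theorem searchLoop_nil (a : List Int) (k : Int) (fuel : Nat) (mp : Int) :
    searchLoop a k fuel [] mp = mp := by
  cases fuel <;> simp [searchLoop]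

-- iterating A's step (used only to state that the levels die within the fuel)
def iterStep (a : List Int) (k : Int) : Nat → List Int → List Int
  | 0, l => l
  | n+1, l => iterStep a k n (searchStep a k l)

theorem iterStep_nil (a : List Int) (k : Int) (n : Nat) : iterStep a k n [] = [] := by
  induction n with
  | zero => rfl
  | succ n ih => simp [iterStep, searchStep_nil, ih]

-- the i-th level (searchStep applied i times)
def lev (a : List Int) (k : Int) : Nat → List Int → List Int
  | 0, l => l
  | n+1, l => searchStep a k (lev a k n l)

theorem lev_searchStep (a : List Int) (k : Int) (n : Nat) (l : List Int) :
    lev a k n (searchStep a k l) = lev a k (n+1) l := by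
  induction n with
  | zero => rfl
  | succ n ih => show searchStep a k (lev a k n (searchStep a k l)) = _; rw [ih]; rfl

theorem iterStep_eq_lev (a : List Int) (k : Int) :
    ∀ (n : Nat) (l : List Int), iterStep a k n l = lev a k n l := by
  intro n
  induction n with
  | zero => intro l; rfl
  | succ n ih => intro l; show iterStep a k n (searchStep a k l) = _; rw [ih, lev_searchStep]

theorem lev_empty_mono (a : List Int) (k : Int) (m : Nat) (l : List Int)
    (h : lev a k m l = []) : ∀ j, lev a k (m + j) l = [] := by
  intro j
  induction j with
  | zero => exact h
  | succ j ih => show searchStep a k (lev a k (m + j) l) = []; rw [ih, searchStep_nil]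

-- the concatenation of levels 1..n starting from l (what A takes maxima over)
def levelsU (a : List Int) (k : Int) : Nat → List Int → List Int
  | 0, _ => []
  | n+1, l => searchStep a k l ++ levelsU a k n (searchStep a k l)

theorem levelsU_nil (a : List Int) (k : Int) (n : Nat) : levelsU a k n [] = [] := by
  induction n with
  | zero => rfl
  | succ n ih =>
    show searchStep a k [] ++ levelsU a k n (searchStep a k []) = []
    rw [searchStep_nil]
    simpa using ih

-- A's loop returns max(max_pack, max over the union of the levels) once the levels die
theorem searchLoop_char (a : List Int) (k : Int) :
    ∀ (n : Nat) (l : List Int) (mp : Int), l ≠ [] → searchStep a k l ≠ [] →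
      iterStep a k n (searchStep a k l) = [] →
      searchLoop a k (n+1) l mp = max mp (pyMaxL (levelsU a k (n+1) l)) := by
  intro n
  induction n with
  | zero =>
    intro l mp hl hs hdie
    exact absurd hdie hs
  | succ n ih =>
    intro l mp hl hs hdie
    have hstep : searchLoop a k (n+1+1) l mp
        = searchLoop a k (n+1) (searchStep a k l) (max mp (pyMaxL (searchStep a k l))) := by
      simp [searchLoop, hl, hs]
    by_cases h2 : searchStep a k (searchStep a k l) = []
    · have hloop : searchLoop a k (n+1) (searchStep a k l) (max mp (pyMaxL (searchStep a k l)))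
          = max (max mp (pyMaxL (searchStep a k l))) (pyMaxL (searchStep a k l)) := by
        simp [searchLoop, hs, h2, searchLoop_nil]
      have hU : levelsU a k (n+1+1) l = searchStep a k l ++ [] := by
        show searchStep a k l ++ (searchStep a k (searchStep a k l)
          ++ levelsU a k n (searchStep a k (searchStep a k l))) = _
        rw [h2, levelsU_nil]
        rfl
      rw [hstep, hloop, hU, List.append_nil, max_assoc, max_self]
    · have hdie' : iterStep a k n (searchStep a k (searchStep a k l)) = [] := hdie
      rw [hstep, ih (searchStep a k l) (max mp (pyMaxL (searchStep a k l))) hs h2 hdie']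
      have hUne : levelsU a k (n+1) (searchStep a k l) ≠ [] := by
        show searchStep a k (searchStep a k l)
          ++ levelsU a k n (searchStep a k (searchStep a k l)) ≠ []
        simp [h2]
      show _ = max mp (pyMaxL (searchStep a k l ++ levelsU a k (n+1) (searchStep a k l)))
      rw [pyMaxL_append _ _ hs hUne, max_assoc]

-- every element of a level union is reachable
theorem searchStep_reach (a : List Int) (k : Int) (packed l : List Int)
    (hl : ∀ v ∈ l, v ∈ packed ∨ Reach a k packed v) :
    ∀ x ∈ searchStep a k l, Reach a k packed x := by
  intro x hx
  obtain ⟨p, hp, e, he, hpe, hk⟩ := (mem_searchStep a k l x).mp hx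
  subst hpe
  rcases hl p hp with h | h
  · exact Reach.base p e h he hk
  · exact Reach.step p e h he hk

theorem levelsU_subset_reach (a : List Int) (k : Int) (packed : List Int) :
    ∀ (n : Nat) (l : List Int), (∀ v ∈ l, v ∈ packed ∨ Reach a k packed v) →
      ∀ x ∈ levelsU a k n l, Reach a k packed x := by
  intro n
  induction n with
  | zero => intro l _ x hx; exact absurd hx (List.not_mem_nil)
  | succ n ih =>
    intro l hl x hx
    rcases List.mem_append.mp hx with h | h
    · exact searchStep_reach a k packed l hl x h
    · exact ih (searchStep a k l) (fun v hv => Or.inr (searchStep_reach a k packed l hl v hv)) x h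

-- every reachable sum lies in some level i ≥ 1
theorem reach_mem_lev (a : List Int) (k : Int) (packed : List Int) (x : Int)
    (h : Reach a k packed x) : ∃ i, x ∈ lev a k (i+1) packed := by
  induction h with
  | base p e hp he hk =>
    exact ⟨0, (mem_searchStep a k packed (p+e)).mpr ⟨p, hp, e, he, rfl, hk⟩⟩
  | step v e _ he hk ih =>
    obtain ⟨i, hv⟩ := ih
    exact ⟨i+1, (mem_searchStep a k (lev a k (i+1) packed) (v+e)).mpr ⟨v, hv, e, he, rfl, hk⟩⟩

theorem lev_subset_levelsU (a : List Int) (k : Int) :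
    ∀ (n i : Nat) (l : List Int), i < n → ∀ x ∈ lev a k (i+1) l, x ∈ levelsU a k n l := by
  intro n
  induction n with
  | zero => intro i l hi; omega
  | succ n ih =>
    intro i l hi x hx
    cases i with
    | zero => exact List.mem_append_left _ hx
    | succ j =>
      apply List.mem_append_right
      apply ih j (searchStep a k l) (by omega) x
      rw [lev_searchStep]
      exact hx

theorem reach_mem_levelsU (a : List Int) (k : Int) (packed : List Int) (n : Nat)
    (hdie : lev a k (n+1) packed = []) (x : Int) (h : Reach a k packed x) :
    x ∈ levelsU a k (n+1) packed := by
  obtain ⟨i, hx⟩ := reach_mem_lev a k packed x h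
  have hin : i < n + 1 := by
    by_contra hge
    have hempty : lev a k ((n+1) + (i + 1 - (n+1))) packed = [] :=
      lev_empty_mono a k (n+1) packed hdie _
    have hieq : (n+1) + (i + 1 - (n+1)) = i + 1 := by omega
    rw [hieq] at hempty
    rw [hempty] at hx
    exact List.not_mem_nil hx
  exact lev_subset_levelsU a k (n+1) i packed hin x hx

-- every sum reached after n+1 rounds exceeds some start value by at least n+1
theorem reach_lower (a : List Int) (k : Int) (hpos : ∀ x ∈ a, 0 < x) :
    ∀ (n : Nat) (l : List Int) (x : Int), x ∈ iterStep a k n (searchStep a k l) →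
      (∃ p ∈ l, p + (n : Int) + 1 ≤ x) ∧ x ≤ k := by
  intro n
  induction n with
  | zero =>
    intro l x hx
    simp only [iterStep] at hx
    obtain ⟨p, hp, e, he, hpe, hk⟩ := (mem_searchStep a k l x).mp hx
    exact ⟨⟨p, hp, by have := hpos e he; push_cast; omega⟩, hk⟩
  | succ n ih =>
    intro l x hx
    obtain ⟨⟨q, hq, hlow⟩, hk⟩ := ih (searchStep a k l) x hx
    obtain ⟨p, hp, e, he, hpe, _⟩ := (mem_searchStep a k l q).mp hq
    exact ⟨⟨p, hp, by have := hpos e he; push_cast at hlow ⊢; omega⟩, hk⟩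

-- fuel sufficiency for A under Pre_
theorem fuel_sufficient (packed : List Int) (a : List Int) (k : Int)
    (hpre : packed = [] ∨ a = [] ∨ (∀ x ∈ a, 0 < x) ∨ (∀ p ∈ packed, ∀ x ∈ a, k < p + x)) :
    iterStep a k (levelFuel packed k) (searchStep a k packed) = [] := by
  rcases hpre with h | h | h | h
  · rw [h, searchStep_nil, iterStep_nil]
  · have hs : searchStep a k packed = [] := by simp [searchStep_eq, h]
    rw [hs, iterStep_nil]
  · rw [List.eq_nil_iff_forall_not_mem]
    intro x hx
    obtain ⟨⟨p, hp, hlow⟩, hk⟩ := reach_lower a k h (levelFuel packed k) packed x hx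
    have hne : packed ≠ [] := by rintro rfl; exact List.not_mem_nil hp
    cases hmin : PySem.List.min? packed (fun x => x) with
    | none => exact absurd ((PySem.List.min?_eq_none_iff packed (fun x => x)).mp hmin) hne
    | some m =>
      have hm : m ≤ p := PySem.List.min?_isMin hmin p hp
      have hfuel : k - m ≤ (levelFuel packed k : Int) := by
        unfold levelFuel
        rw [hmin, Option.getD_some]
        exact Int.self_le_toNat _
      omega
  · have hs : searchStep a k packed = [] := by
      rw [List.eq_nil_iff_forall_not_mem]
      intro x hx
      obtain ⟨p, hp, e, he, hpe, hk⟩ := (mem_searchStep a k packed x).mp hx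
      have := h p hp e he
      omega
    rw [hs, iterStep_nil]

-- ---- B-side characterization ----

-- a nodup list of ints inside (lo, k] has at most (k-lo).toNat elements
theorem nodup_bounded_length (l : List Int) (lo k : Int) (hn : l.Nodup)
    (hb : ∀ x ∈ l, lo < x ∧ x ≤ k) : l.length ≤ (k - lo).toNat := by
  have hsub : l.toFinset ⊆ Finset.Ioc lo k := by
    intro x hx
    rw [List.mem_toFinset] at hx
    rw [Finset.mem_Ioc]
    exact hb x hx
  calc l.length = l.toFinset.card := (List.toFinset_card_of_nodup hn).symm
    _ ≤ (Finset.Ioc lo k).card := Finset.card_le_card hsub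
    _ = (k - lo).toNat := Int.card_Ioc lo k

theorem nodup_length_le_of_subset (l m : List Int) (h : l.Nodup) (hs : ∀ x ∈ l, x ∈ m) :
    l.length ≤ m.length := by
  have h1 : l.toFinset ⊆ m.toFinset := by
    intro x hx
    rw [List.mem_toFinset] at *
    exact hs x hx
  calc l.length = l.toFinset.card := (List.toFinset_card_of_nodup h).symm
    _ ≤ m.toFinset.card := Finset.card_le_card h1
    _ ≤ m.length := m.toFinset_card_le

-- what one visit does to (seen, stack): new seen = old seen ∪ {v+e ≤ k : e ∈ a},
-- the stack gains exactly the fresh elements, and both grow by the same amount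
theorem altVisit_char (a : List Int) (k v : Int) :
    ∀ (seen : PySem.Set Int) (st : List Int), seen.Nodup →
      (altVisit a k (seen, st) v).1.Nodup
      ∧ (∀ x, x ∈ (altVisit a k (seen, st) v).1 ↔ x ∈ seen ∨ ∃ e ∈ a, x = v + e ∧ x ≤ k)
      ∧ (∀ x, x ∈ (altVisit a k (seen, st) v).2 ↔
          x ∈ st ∨ (x ∈ (altVisit a k (seen, st) v).1 ∧ x ∉ seen))
      ∧ (altVisit a k (seen, st) v).1.length + st.length
          = (altVisit a k (seen, st) v).2.length + seen.length := by
  induction a with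
  | nil =>
    intro seen st hn
    refine ⟨hn, ?_, ?_, by simp [altVisit, Nat.add_comm]⟩
    · intro x; simp [altVisit]
    · intro x
      simp only [altVisit, List.foldl_nil]
      constructor
      · intro h; exact Or.inl h
      · rintro (h | ⟨h1, h2⟩)
        · exact h
        · exact absurd h1 h2
  | cons e rest ih =>
    intro seen st hn
    by_cases hg : v + e ≤ k ∧ v + e ∉ seen
    · have hstep : altVisit (e :: rest) k (seen, st) v
          = altVisit rest k (PySem.Set.add seen (v+e), (v+e) :: st) v := by
        simp only [altVisit, List.foldl_cons]
        rw [if_pos hg]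
      have hn1 : (PySem.Set.add seen (v+e)).Nodup := PySem.Set.nodup_add seen (v+e) hn
      obtain ⟨N, M, S, L⟩ := ih (PySem.Set.add seen (v+e)) ((v+e) :: st) hn1
      rw [hstep]
      have hmono : ∀ x, x ∈ PySem.Set.add seen (v+e) →
          x ∈ (altVisit rest k (PySem.Set.add seen (v+e), (v+e) :: st) v).1 := by
        intro x hx; exact (M x).mpr (Or.inl hx)
      refine ⟨N, ?_, ?_, ?_⟩
      · intro x
        rw [M x, PySem.Set.mem_add]
        constructor
        · rintro ((h | h) | ⟨e', he', hx, hk⟩)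
          · exact Or.inl h
          · exact Or.inr ⟨e, List.mem_cons_self, h, by rw [h]; exact hg.1⟩
          · exact Or.inr ⟨e', List.mem_cons_of_mem _ he', hx, hk⟩
        · rintro (h | ⟨e', he', hx, hk⟩)
          · exact Or.inl (Or.inl h)
          · rcases List.mem_cons.mp he' with heq | he''
            · exact Or.inl (Or.inr (heq ▸ hx))
            · exact Or.inr ⟨e', he'', hx, hk⟩
      · intro x
        rw [S x, List.mem_cons]
        constructor
        · rintro ((rfl | h) | ⟨h1, h2⟩)
          · exact Or.inr ⟨hmono _ ((PySem.Set.mem_add _ _ _).mpr (Or.inr rfl)), hg.2⟩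
          · exact Or.inl h
          · refine Or.inr ⟨h1, ?_⟩
            intro hxs
            exact h2 ((PySem.Set.mem_add _ _ _).mpr (Or.inl hxs))
        · rintro (h | ⟨h1, h2⟩)
          · exact Or.inl (Or.inr h)
          · by_cases hxe : x = v + e
            · exact Or.inl (Or.inl hxe)
            · refine Or.inr ⟨h1, ?_⟩
              intro hxadd
              rcases (PySem.Set.mem_add _ _ _).mp hxadd with h' | h'
              · exact h2 h'
              · exact hxe h'
      · have hadd : (PySem.Set.add seen (v+e)).length = seen.length + 1 := by
          rw [PySem.Set.add_of_not_mem hg.2, List.length_append]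
          rfl
        have hst : ((v+e) :: st).length = st.length + 1 := rfl
        omega
    · have hstep : altVisit (e :: rest) k (seen, st) v = altVisit rest k (seen, st) v := by
        simp only [altVisit, List.foldl_cons]
        rw [if_neg hg]
      obtain ⟨N, M, S, L⟩ := ih seen st hn
      rw [hstep]
      refine ⟨N, ?_, S, L⟩
      intro x
      rw [M x]
      constructor
      · rintro (h | ⟨e', he', hx, hk⟩)
        · exact Or.inl h
        · exact Or.inr ⟨e', List.mem_cons_of_mem _ he', hx, hk⟩
      · rintro (h | ⟨e', he', hx, hk⟩)
        · exact Or.inl h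
        · rcases List.mem_cons.mp he' with heq | he''
          · -- guard failed: either v+e > k (contradiction) or v+e ∈ seen
            rw [heq] at hx
            rcases not_and_or.mp hg with h' | h'
            · rw [hx] at hk
              exact absurd hk h'
            · rw [hx]
              exact Or.inl (not_not.mp h')
          · exact Or.inr ⟨e', he'', hx, hk⟩

-- the initial seeding pass: seen and stack hold exactly the one-step sums, equal as sets
theorem initBuild_char (a : List Int) (k : Int) :
    ∀ (ps : List Int) (seen : PySem.Set Int) (st : List Int), seen.Nodup →
      (∀ x, x ∈ st ↔ x ∈ seen) → st.length = seen.length →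
      (ps.foldl (altVisit a k) (seen, st)).1.Nodup
      ∧ (∀ x, x ∈ (ps.foldl (altVisit a k) (seen, st)).1 ↔
          x ∈ seen ∨ ∃ p ∈ ps, ∃ e ∈ a, x = p + e ∧ x ≤ k)
      ∧ (∀ x, x ∈ (ps.foldl (altVisit a k) (seen, st)).2 ↔
          x ∈ (ps.foldl (altVisit a k) (seen, st)).1)
      ∧ (ps.foldl (altVisit a k) (seen, st)).2.length
          = (ps.foldl (altVisit a k) (seen, st)).1.length := by
  intro ps
  induction ps with
  | nil =>
    intro seen st hn hiff hlen
    refine ⟨hn, ?_, hiff, hlen⟩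
    intro x; simp
  | cons p rest ih =>
    intro seen st hn hiff hlen
    obtain ⟨N1, M1, S1, L1⟩ := altVisit_char a k p seen st hn
    have hiff1 : ∀ x, x ∈ (altVisit a k (seen, st) p).2 ↔ x ∈ (altVisit a k (seen, st) p).1 := by
      intro x
      rw [S1 x]
      constructor
      · rintro (h | ⟨h1, _⟩)
        · exact (M1 x).mpr (Or.inl ((hiff x).mp h))
        · exact h1
      · intro h
        by_cases hs : x ∈ seen
        · exact Or.inl ((hiff x).mpr hs)
        · exact Or.inr ⟨h, hs⟩
    have hlen1 : (altVisit a k (seen, st) p).2.length = (altVisit a k (seen, st) p).1.length := by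
      omega
    have hfold : (p :: rest).foldl (altVisit a k) (seen, st)
        = rest.foldl (altVisit a k) ((altVisit a k (seen, st) p).1, (altVisit a k (seen, st) p).2) := by
      simp [List.foldl_cons]
    obtain ⟨N2, M2, S2, L2⟩ :=
      ih (altVisit a k (seen, st) p).1 (altVisit a k (seen, st) p).2 N1 hiff1 hlen1
    rw [hfold]
    refine ⟨N2, ?_, S2, L2⟩
    intro x
    rw [M2 x, M1 x]
    constructor
    · rintro ((h | ⟨e, he, hx, hk⟩) | ⟨q, hq, e, he, hx, hk⟩)
      · exact Or.inl h
      · exact Or.inr ⟨p, List.mem_cons_self, e, he, hx, hk⟩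
      · exact Or.inr ⟨q, List.mem_cons_of_mem _ hq, e, he, hx, hk⟩
    · rintro (h | ⟨q, hq, e, he, hx, hk⟩)
      · exact Or.inl (Or.inl h)
      · rcases List.mem_cons.mp hq with heq | hq'
        · rw [heq] at hx
          exact Or.inl (Or.inr ⟨e, he, hx, hk⟩)
        · exact Or.inr ⟨q, hq', e, he, hx, hk⟩

-- a set containing the one-step sums and closed under adding elements of a contains Reach
theorem reach_in_closed (a : List Int) (k : Int) (packed : List Int) (S : List Int)
    (hbase : ∀ p ∈ packed, ∀ e ∈ a, p + e ≤ k → p + e ∈ S)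
    (hclosed : ∀ v ∈ S, ∀ e ∈ a, v + e ≤ k → v + e ∈ S) :
    ∀ x, Reach a k packed x → x ∈ S := by
  intro x h
  induction h with
  | base p e hp he hk => exact hbase p hp e he hk
  | step v e _ he hk ih => exact hclosed v ih e he hk

-- the worklist loop: with the stated invariants and enough fuel, the final visited
-- set is exactly the set of reachable sums
theorem altLoop_char (a : List Int) (k : Int) (packed : List Int) (lo : Int)
    (hpos : ∀ e ∈ a, 0 < e) :
    ∀ (fuel : Nat) (seen : PySem.Set Int) (stack : List Int),
      seen.Nodup →
      (∀ x ∈ stack, x ∈ seen) →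
      (∀ x ∈ seen, Reach a k packed x) →
      (∀ v ∈ seen, v ∉ stack → ∀ e ∈ a, v + e ≤ k → v + e ∈ seen) →
      (∀ p ∈ packed, ∀ e ∈ a, p + e ≤ k → p + e ∈ seen) →
      (∀ x ∈ seen, lo < x ∧ x ≤ k) →
      stack.length + ((k - lo).toNat - seen.length) ≤ fuel →
      ∀ x, x ∈ altLoop a k fuel seen stack ↔ Reach a k packed x := by
  intro fuel
  induction fuel with
  | zero =>
    intro seen stack hn h2 h3 h4 h5 h6 h7 x
    have hst : stack = [] := List.eq_nil_iff_length_eq_zero.mpr (by omega)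
    subst hst
    show x ∈ seen ↔ _
    constructor
    · exact h3 x
    · intro h
      exact reach_in_closed a k packed seen h5
        (fun v hv e he hk => h4 v hv (List.not_mem_nil) e he hk) x h
  | succ fuel ih =>
    intro seen stack hn h2 h3 h4 h5 h6 h7 x
    cases stack with
    | nil =>
      show x ∈ seen ↔ _
      constructor
      · exact h3 x
      · intro h
        exact reach_in_closed a k packed seen h5
          (fun v hv e he hk => h4 v hv (List.not_mem_nil) e he hk) x h
    | cons v rest =>
      have hvseen : v ∈ seen := h2 v List.mem_cons_self
      obtain ⟨N, M, S, L⟩ := altVisit_char a k v seen rest hn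
      have hmono : ∀ y ∈ seen, y ∈ (altVisit a k (seen, rest) v).1 :=
        fun y hy => (M y).mpr (Or.inl hy)
      have hloop : altLoop a k (fuel+1) seen (v :: rest)
          = altLoop a k fuel (altVisit a k (seen, rest) v).1 (altVisit a k (seen, rest) v).2 := rfl
      rw [hloop]
      apply ih
      · exact N
      · intro y hy
        rcases (S y).mp hy with h | ⟨h1, _⟩
        · exact hmono y (h2 y (List.mem_cons_of_mem _ h))
        · exact h1
      · intro y hy
        rcases (M y).mp hy with h | ⟨e, he, hx, hk⟩
        · exact h3 y h
        · subst hx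
          exact Reach.step v e (h3 v hvseen) he hk
      · intro w hw hwst e he hk
        by_cases hws : w ∈ seen
        · by_cases hwv : w = v
          · subst hwv
            exact (M (w+e)).mpr (Or.inr ⟨e, he, rfl, hk⟩)
          · have hwrest : w ∉ rest := fun hr => hwst ((S w).mpr (Or.inl hr))
            have hwvr : w ∉ (v :: rest) := by
              intro hc
              rcases List.mem_cons.mp hc with h | h
              · exact hwv h
              · exact hwrest h
            exact hmono _ (h4 w hws hwvr e he hk)
        · -- w is fresh: then w would be on the new stack, contradiction
          exact absurd ((S w).mpr (Or.inr ⟨hw, hws⟩)) hwst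
      · intro p hp e he hk
        exact hmono _ (h5 p hp e he hk)
      · intro y hy
        rcases (M y).mp hy with h | ⟨e, he, hx, hk⟩
        · exact h6 y h
        · subst hx
          have h1 := (h6 v hvseen).1
          have h2e := hpos e he
          constructor <;> omega
      · have hcap : (altVisit a k (seen, rest) v).1.length ≤ (k - lo).toNat := by
          apply nodup_bounded_length _ lo k N
          intro y hy
          rcases (M y).mp hy with h | ⟨e, he, hx, hk⟩
          · exact h6 y h
          · subst hx
            have h1 := (h6 v hvseen).1
            have h2e := hpos e he
            constructor <;> omega
        have hseenle : seen.length ≤ (altVisit a k (seen, rest) v).1.length :=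
          nodup_length_le_of_subset seen _ hn hmono
        have hlen : (v :: rest).length = rest.length + 1 := rfl
        omega

-- ===== VERDICT (by name: the statement is the Claim_ definition above) =====
theorem search_spec : Claim_equal_search := by
  intro packed mp a k _ hpre
  unfold Spec_search search search_alt
  by_cases hp : packed = []
  · subst hp
    rw [if_pos rfl, searchLoop_nil]
  · rw [if_neg hp]
    obtain ⟨N0, M0, S0, L0⟩ := initBuild_char a k packed [] []
      List.nodup_nil (fun x => Iff.rfl) rfl
    by_cases hbase : searchStep a k packed = []
    · -- no one-step sum: both return max(mp, max(packed))
      have hst : (packed.foldl (altVisit a k) ([], [])).2 = [] := by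
        rw [List.eq_nil_iff_forall_not_mem]
        intro x hx
        rcases (M0 x).mp ((S0 x).mp hx) with h | ⟨p, hp', e, he, hxe, hk⟩
        · exact List.not_mem_nil h
        · have hmem : x ∈ searchStep a k packed :=
            (mem_searchStep a k packed x).mpr ⟨p, hp', e, he, hxe.symm, hk⟩
          rw [hbase] at hmem
          exact List.not_mem_nil hmem
      rw [if_pos hst]
      show searchLoop a k (levelFuel packed k + 1) packed mp = _
      simp [searchLoop, hp, hbase, searchLoop_nil]
    · -- at least one one-step sum: a must be positive (other Pre_ branches kill level 1)
      have hpos : ∀ x ∈ a, 0 < x := by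
        obtain ⟨y, hy⟩ := List.exists_mem_of_ne_nil _ hbase
        obtain ⟨p, hp', e, he, hpe, hk⟩ := (mem_searchStep a k packed y).mp hy
        rcases hpre with h | h | h | h
        · exact absurd h hp
        · rw [h] at he; exact absurd he (List.not_mem_nil)
        · exact h
        · exact absurd (h p hp' e he) (by omega)
      have hst : (packed.foldl (altVisit a k) ([], [])).2 ≠ [] := by
        obtain ⟨y, hy⟩ := List.exists_mem_of_ne_nil _ hbase
        obtain ⟨p, hp', e, he, hpe, hk⟩ := (mem_searchStep a k packed y).mp hy
        intro hnil
        have : y ∈ (packed.foldl (altVisit a k) ([], [])).2 :=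
          (S0 y).mpr ((M0 y).mpr (Or.inr ⟨p, hp', e, he, hpe.symm, hk⟩))
        rw [hnil] at this
        exact List.not_mem_nil this
      rw [if_neg hst]
      -- min(packed) as the lower bound lo
      obtain ⟨m, hmin⟩ : ∃ m, PySem.List.min? packed (fun x => x) = some m := by
        cases hm : PySem.List.min? packed (fun x => x) with
        | none => exact absurd ((PySem.List.min?_eq_none_iff packed (fun x => x)).mp hm) hp
        | some m => exact ⟨m, rfl⟩
      have hcap : levelFuel packed k = (k - m).toNat := by
        unfold levelFuel
        rw [hmin, Option.getD_some]
      -- B's visited set after the loop is exactly Reach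
      have hrange : ∀ x ∈ (packed.foldl (altVisit a k) ([], [])).1, m < x ∧ x ≤ k := by
        intro x hx
        rcases (M0 x).mp hx with h | ⟨p, hp', e, he, hxe, hk⟩
        · exact absurd h (List.not_mem_nil)
        · have := PySem.List.min?_isMin hmin p hp'
          have := hpos e he
          constructor <;> omega
      have hBmem : ∀ x, x ∈ altLoop a k (levelFuel packed k + 1)
          (packed.foldl (altVisit a k) ([], [])).1 (packed.foldl (altVisit a k) ([], [])).2
          ↔ Reach a k packed x := by
        apply altLoop_char a k packed m hpos
        · exact N0
        · intro x hx; exact (S0 x).mp hx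
        · intro x hx
          rcases (M0 x).mp hx with h | ⟨p, hp', e, he, hxe, hk⟩
          · exact absurd h (List.not_mem_nil)
          · rw [hxe]
            rw [hxe] at hk
            exact Reach.base p e hp' he hk
        · intro v hv hvst e he hk
          exact absurd ((S0 v).mpr hv) hvst
        · intro p hp' e he hk
          exact (M0 _).mpr (Or.inr ⟨p, hp', e, he, rfl, hk⟩)
        · exact hrange
        · have hb : (packed.foldl (altVisit a k) ([], [])).1.length ≤ (k - m).toNat :=
            nodup_bounded_length _ m k N0 hrange
          rw [hcap]
          omega
      -- A's loop value via the union of levels, whose membership is also Reach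
      have hdie : iterStep a k (levelFuel packed k) (searchStep a k packed) = [] :=
        fuel_sufficient packed a k hpre
      have hAchar := searchLoop_char a k (levelFuel packed k) packed mp hp hbase hdie
      have hlevdie : lev a k (levelFuel packed k + 1) packed = [] := by
        rw [← lev_searchStep, ← iterStep_eq_lev]
        exact hdie
      have hAmem : ∀ x, x ∈ levelsU a k (levelFuel packed k + 1) packed ↔ Reach a k packed x := by
        intro x
        constructor
        · exact levelsU_subset_reach a k packed _ packed (fun v hv => Or.inl hv) x
        · exact reach_mem_levelsU a k packed (levelFuel packed k) hlevdie x
      have hUne : levelsU a k (levelFuel packed k + 1) packed ≠ [] := by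
        show searchStep a k packed ++ _ ≠ []
        simp [hbase]
      show searchLoop a k (levelFuel packed k + 1) packed mp = _
      rw [hAchar]
      congr 1
      exact pyMaxL_congr _ _ hUne (fun x => (hAmem x).trans ((hBmem x).symm))
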